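-- pv_equiv track=rewrite | github.com/sendoru/ps-cpp-new | source/boj/14014.py | thanos_vowel
-- ===== SOURCE A (Python) =====
-- def thanos_vowel(s: str) -> str:
--     vowel_cnt = 0
--     for c in s:
--         if c in ('a', 'e', 'i', 'o', 'u'):
--             vowel_cnt += 1
--     vowel_cnt //= 2
--
--     ret = []
--     for c in s:
--         if c in ('a', 'e', 'i', 'o', 'u'):
--             if vowel_cnt > 0:
--                 vowel_cnt -= 1
--             else:
--                 ret.append(c)
--         else:
--             ret.append(c)
--
--     return ''.join(ret)
-- ===== SOURCE B (Python) =====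
-- def thanos_vowel(s: str) -> str:
--     out = []
--     slots = []   # positions in out of the vowels seen so far
--     removed = 0  # vowels blanked so far (= vowels_seen // 2)
--     for c in s:
--         out.append(c)
--         if c in ('a', 'e', 'i', 'o', 'u'):
--             slots.append(len(out) - 1)
--             if len(slots) % 2 == 0:
--                 out[slots[removed]] = None
--                 removed += 1
--     return ''.join(c for c in out if c is not None)
-- ===== Notes on version B (the rewrite author's own statement) =====
-- stated objective: alternative
-- what changed: B is a single-pass online algorithm: it never pre-counts the vowels; when the t-th vowel arrives and t is even it blanks the (t/2)-th vowel already emitted (tracked via a slot list), then joins the non-blanked characters, whereas A first counts all vowels and then re-scans with a decrementing skip-counter.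
import Mathlib
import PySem

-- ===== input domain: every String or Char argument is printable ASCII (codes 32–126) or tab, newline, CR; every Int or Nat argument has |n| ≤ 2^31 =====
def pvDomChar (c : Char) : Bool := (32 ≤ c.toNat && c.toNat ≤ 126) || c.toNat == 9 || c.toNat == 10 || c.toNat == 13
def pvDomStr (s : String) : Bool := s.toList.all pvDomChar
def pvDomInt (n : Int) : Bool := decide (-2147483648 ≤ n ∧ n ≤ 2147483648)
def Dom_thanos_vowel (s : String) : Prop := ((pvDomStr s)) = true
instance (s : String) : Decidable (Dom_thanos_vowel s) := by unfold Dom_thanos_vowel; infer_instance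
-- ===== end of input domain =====

-- B is a single-pass online algorithm (no pre-count): when the t-th vowel arrives and t is
-- even it blanks the (t/2)-th vowel already emitted; same O(n) cost, different algorithm.

-- ===== PORT A =====
-- c in ('a','e','i','o','u')
def pvIsVowel (c : Char) : Bool := c == 'a' || c == 'e' || c == 'i' || c == 'o' || c == 'u'

def thanos_vowel (s : String) : String :=
  let cnt0 : Int := s.toList.foldl (fun n c => if pvIsVowel c then n + 1 else n) 0
  let vowel_cnt : Int := PySem.Int.floordiv cnt0 2
  let st := s.toList.foldl
    (fun (st : Int × List Char) c =>
      if pvIsVowel c then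
        if st.1 > 0 then (st.1 - 1, st.2) else (st.1, st.2 ++ [c])
      else (st.1, st.2 ++ [c]))
    (vowel_cnt, ([] : List Char))
  String.mk st.2

-- ===== PORT B =====
-- state: (out : chars-or-blanks built so far, slots : positions in out of the vowels seen, removed)
-- 'out[slots[removed]] = None' → PySem.List.pySetD / pyGetD, the total subscript forms:
-- removed = len(slots)//2 < len(slots) and every slot is < len(out), so both are always in range
def thanos_vowel_alt (s : String) : String :=
  let fin := s.toList.foldl
    (fun (st : List (Option Char) × List Int × Int) c =>
      let out := st.1 ++ [some c]
      if pvIsVowel c then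
        let slots := st.2.1 ++ [(out.length : Int) - 1]
        if PySem.Int.mod (slots.length : Int) 2 == 0 then
          (PySem.List.pySetD out (PySem.List.pyGetD slots st.2.2 0) none, slots, st.2.2 + 1)
        else (out, slots, st.2.2)
      else (out, st.2.1, st.2.2))
    ([], [], 0)
  String.mk (fin.1.filterMap id)

-- ===== PRECONDITION & SPEC =====
def Spec_thanos_vowel (s : String) (out : String) : Prop := out = thanos_vowel_alt s
instance (s : String) (out : String) : Decidable (Spec_thanos_vowel s out) := by unfold Spec_thanos_vowel; infer_instance

-- ===== CLAIM (what is proved, stated in full; the proofs are below) =====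
def Claim_equal_thanos_vowel : Prop := ∀ (s : String), Dom_thanos_vowel s → Spec_thanos_vowel s (thanos_vowel s)

-- ===== LEMMAS AND PROOFS =====

/-- Reference: the string with its first `n` vowels removed. -/
def pvSkip : Nat → List Char → List Char
  | _, [] => []
  | n, c :: cs =>
    if pvIsVowel c then
      match n with
      | 0 => c :: pvSkip 0 cs
      | m + 1 => pvSkip m cs
    else c :: pvSkip n cs

/-- Reference: the string with its first `n` vowels BLANKED (replaced by `none`). -/
def pvMask : Nat → List Char → List (Option Char)
  | _, [] => []
  | n, c :: cs =>
    if pvIsVowel c then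
      match n with
      | 0 => some c :: pvMask 0 cs
      | m + 1 => none :: pvMask m cs
    else some c :: pvMask n cs

/-- Positions (offset `t`) of the vowels of `cs`. -/
def pvVpos (t : Int) : List Char → List Int
  | [] => []
  | c :: cs => if pvIsVowel c then t :: pvVpos (t + 1) cs else pvVpos (t + 1) cs

theorem pvMask_length (n : Nat) (cs : List Char) : (pvMask n cs).length = cs.length := by
  induction cs generalizing n with
  | nil => rfl
  | cons c cs ih =>
    by_cases hv : pvIsVowel c
    · cases n <;> simp [pvMask, hv, ih]
    · simp [pvMask, hv, ih]

theorem pvVpos_length (t : Int) (cs : List Char) :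
    (pvVpos t cs).length = cs.countP pvIsVowel := by
  induction cs generalizing t with
  | nil => rfl
  | cons c cs ih =>
    by_cases hv : pvIsVowel c <;> simp [pvVpos, hv, ih]

theorem pvVpos_append (t : Int) (p : List Char) (c : Char) :
    pvVpos t (p ++ [c]) =
      pvVpos t p ++ (if pvIsVowel c then [t + p.length] else []) := by
  induction p generalizing t with
  | nil => by_cases hv : pvIsVowel c <;> simp [pvVpos, hv]
  | cons d p ih =>
    by_cases hd : pvIsVowel d <;>
      simp [pvVpos, hd, ih (t + 1)] <;> split <;> simp <;> ring

theorem pvMask_append (k : Nat) (p : List Char) (c : Char)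
    (h : k ≤ p.countP pvIsVowel) :
    pvMask k (p ++ [c]) = pvMask k p ++ [some c] := by
  induction p generalizing k with
  | nil =>
    have hk0 : k = 0 := by simpa using h
    subst hk0
    by_cases hv : pvIsVowel c <;> simp [pvMask, hv]
  | cons d p ih =>
    by_cases hd : pvIsVowel d
    · cases k with
      | zero => simp [pvMask, hd, ih 0 (Nat.zero_le _)]
      | succ m =>
        have : m ≤ p.countP pvIsVowel := by
          simp [hd] at h; omega
        simp [pvMask, hd, ih m this]
    · have : k ≤ p.countP pvIsVowel := by
        simp [hd] at h; omega
      simp [pvMask, hd, ih k this]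

/-- The `k`-th vowel of `cs` sits at some position `j`; blanking it turns `pvMask k` into
`pvMask (k+1)`. -/
theorem pvMask_set (cs : List Char) (t : Int) (k : Nat) (h : k < cs.countP pvIsVowel) :
    ∃ j : Nat, (pvVpos t cs)[k]? = some (t + (j : Int)) ∧ j < cs.length ∧
      (pvMask k cs).set j none = pvMask (k + 1) cs := by
  induction cs generalizing t k with
  | nil => simp at h
  | cons c cs ih =>
    by_cases hv : pvIsVowel c
    · cases k with
      | zero =>
        refine ⟨0, ?_, by simp, ?_⟩
        · simp [pvVpos, hv]
        · simp [pvMask, hv]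
      | succ m =>
        have hm : m < cs.countP pvIsVowel := by
          simp [hv] at h; omega
        obtain ⟨j, h1, h2, h3⟩ := ih (t + 1) m hm
        refine ⟨j + 1, ?_, by simp; omega, ?_⟩
        · simp [pvVpos, hv, h1]; ring
        · simp [pvMask, hv, h3]
    · have hk : k < cs.countP pvIsVowel := by
        simpa [List.countP_cons, hv] using h
      obtain ⟨j, h1, h2, h3⟩ := ih (t + 1) k hk
      refine ⟨j + 1, ?_, by simp; omega, ?_⟩
      · simp [pvVpos, hv, h1]; ring
      · simp [pvMask, hv, h3]

/-- B's loop state after processing prefix `p`. -/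
def pvIState (p : List Char) : List (Option Char) × List Int × Int :=
  (pvMask (p.countP pvIsVowel / 2) p, pvVpos 0 p, ((p.countP pvIsVowel / 2 : Nat) : Int))

def pvStep (st : List (Option Char) × List Int × Int) (c : Char) :
    List (Option Char) × List Int × Int :=
  let out := st.1 ++ [some c]
  if pvIsVowel c then
    let slots := st.2.1 ++ [(out.length : Int) - 1]
    if PySem.Int.mod (slots.length : Int) 2 == 0 then
      (PySem.List.pySetD out (PySem.List.pyGetD slots st.2.2 0) none, slots, st.2.2 + 1)
    else (out, slots, st.2.2)
  else (out, st.2.1, st.2.2)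

theorem pvStep_inv (p : List Char) (c : Char) : pvStep (pvIState p) c = pvIState (p ++ [c]) := by
  set v := p.countP pvIsVowel with hvdef
  have hk2v : v / 2 ≤ p.countP pvIsVowel := by rw [← hvdef]; exact Nat.div_le_self v 2
  have hout : pvMask (v / 2) p ++ [some c] = pvMask (v / 2) (p ++ [c]) :=
    (pvMask_append _ _ _ hk2v).symm
  have hlen1 : ((pvMask (v / 2) p ++ [some c]).length : Int) - 1 = (p.length : Int) := by
    simp [pvMask_length]
  by_cases hv : pvIsVowel c
  · have hcnt : (p ++ [c]).countP pvIsVowel = v + 1 := by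
      simp [List.countP_append, hv, ← hvdef]
    have hslots : pvVpos 0 (p ++ [c]) = pvVpos 0 p ++ [(p.length : Int)] := by
      rw [pvVpos_append]; simp [hv]
    have hslen : (pvVpos 0 (p ++ [c])).length = v + 1 := by
      rw [pvVpos_length, hcnt]
    unfold pvStep pvIState
    rw [← hvdef, hcnt, if_pos hv, hlen1, ← hslots]
    simp only [hslen]
    by_cases hpar : (v + 1) % 2 = 0
    · -- v odd: vowel number v/2 gets blanked
      have hvodd : v % 2 = 1 := by omega
      have hhalf : (v + 1) / 2 = v / 2 + 1 := by omega
      have hklt : v / 2 < (p ++ [c]).countP pvIsVowel := by rw [hcnt]; omega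
      obtain ⟨j, h1, _h2, h3⟩ := pvMask_set (p ++ [c]) 0 (v / 2) hklt
      have e : PySem.Int.mod (((v + 1 : Nat)) : Int) 2 = 0 := by
        have h := PySem.Int.mod_natCast (v + 1) 2
        rw [hpar] at h
        exact_mod_cast h
      have hget : PySem.List.pyGetD (pvVpos 0 (p ++ [c])) ((v / 2 : Nat) : Int) 0
          = ((j : Nat) : Int) := by
        rw [PySem.List.pyGetD_natCast]
        simp [List.getD_eq_getElem?_getD, h1]
      have hset : PySem.List.pySetD (pvMask (v / 2) (p ++ [c])) ((j : Nat) : Int) none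
          = pvMask (v / 2 + 1) (p ++ [c]) := by
        rw [PySem.List.pySetD_natCast, h3]
      rw [e, hhalf]
      rw [if_pos (by decide)]
      rw [hout, hget, hset]
      simp
    · -- v even: nothing blanked
      have hvev : (v + 1) % 2 = 1 := by omega
      have hhalf : (v + 1) / 2 = v / 2 := by omega
      have e : PySem.Int.mod (((v + 1 : Nat)) : Int) 2 = 1 := by
        have h := PySem.Int.mod_natCast (v + 1) 2
        rw [hvev] at h
        exact_mod_cast h
      rw [e, hhalf]
      rw [if_neg (by decide)]
      rw [hout]
  · have hcnt : (p ++ [c]).countP pvIsVowel = v := by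
      simp [List.countP_append, hv, ← hvdef]
    have hslots : pvVpos 0 (p ++ [c]) = pvVpos 0 p := by
      rw [pvVpos_append]; simp [hv]
    unfold pvStep pvIState
    rw [← hvdef, hcnt, if_neg (by simp [hv]), hout, hslots]

theorem pvFoldB (cs p : List Char) :
    cs.foldl pvStep (pvIState p) = pvIState (p ++ cs) := by
  induction cs generalizing p with
  | nil => simp
  | cons c cs ih =>
    rw [List.foldl_cons, pvStep_inv, ih]
    congr 1
    simp

/-- Joining the non-blanked cells of `pvMask` removes the first `n` vowels. -/
theorem pvMask_filterMap (n : Nat) (cs : List Char) :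
    (pvMask n cs).filterMap id = pvSkip n cs := by
  induction cs generalizing n with
  | nil => rfl
  | cons c cs ih =>
    have ih' : ∀ m, List.filterMap (fun x => x) (pvMask m cs) = pvSkip m cs := by
      simpa [Function.id_def] using ih
    by_cases hv : pvIsVowel c
    · cases n <;> simp [pvMask, pvSkip, hv, ih']
    · simp [pvMask, pvSkip, hv, ih']

/-- A's second loop computes `pvSkip`. -/
theorem pvFoldA (cs : List Char) (n : Nat) (acc : List Char) :
    (cs.foldl
      (fun (st : Int × List Char) c =>
        if pvIsVowel c then
          if st.1 > 0 then (st.1 - 1, st.2) else (st.1, st.2 ++ [c])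
        else (st.1, st.2 ++ [c]))
      ((n : Int), acc)).2 = acc ++ pvSkip n cs := by
  induction cs generalizing n acc with
  | nil => simp [pvSkip]
  | cons c cs ih =>
    by_cases hv : pvIsVowel c
    · cases n with
      | zero =>
        simp only [List.foldl_cons, hv, if_true, Nat.cast_zero]
        have h0 : ¬ ((0 : Int) > 0) := by omega
        rw [if_neg h0]
        have := ih 0 (acc ++ [c])
        simp only [Nat.cast_zero] at this
        rw [this]
        simp [pvSkip, hv]
      | succ m =>
        simp only [List.foldl_cons, hv, if_true]
        have h1 : ((m + 1 : Nat) : Int) > 0 := by positivity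
        rw [if_pos h1]
        have h2 : ((m + 1 : Nat) : Int) - 1 = ((m : Nat) : Int) := by push_cast; ring
        rw [h2, ih m acc]
        simp [pvSkip, hv]
    · simp only [List.foldl_cons, hv, if_false, Bool.false_eq_true]
      rw [ih n (acc ++ [c])]
      simp [pvSkip, hv]

-- ===== VERDICT (by name: the statement is the Claim_ definition above) =====
theorem thanos_vowel_spec : Claim_equal_thanos_vowel := by
  intro s _
  unfold Spec_thanos_vowel thanos_vowel thanos_vowel_alt
  set cs := s.toList with hcs
  have hcnt : cs.foldl (fun n c => if pvIsVowel c then n + 1 else n) (0 : Int)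
      = ((cs.countP pvIsVowel : Nat) : Int) := by
    simpa using PySem.List.foldl_count_if pvIsVowel cs 0
  set v : Nat := cs.countP pvIsVowel with hv
  have hfd : PySem.Int.floordiv ((v : Nat) : Int) 2 = ((v / 2 : Nat) : Int) := by
    exact_mod_cast PySem.Int.floordiv_natCast v 2
  have hB : cs.foldl
      (fun (st : List (Option Char) × List Int × Int) c =>
        let out := st.1 ++ [some c]
        if pvIsVowel c then
          let slots := st.2.1 ++ [(out.length : Int) - 1]
          if PySem.Int.mod (slots.length : Int) 2 == 0 then
            (PySem.List.pySetD out (PySem.List.pyGetD slots st.2.2 0) none, slots, st.2.2 + 1)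
          else (out, slots, st.2.2)
        else (out, st.2.1, st.2.2))
      ([], [], 0) = pvIState cs := by
    have h0 : pvIState [] = (([] : List (Option Char)), ([] : List Int), (0 : Int)) := by
      simp [pvIState, pvMask, pvVpos]
    calc cs.foldl _ ([], [], 0) = cs.foldl pvStep (pvIState []) := by rw [h0]; rfl
      _ = pvIState ([] ++ cs) := pvFoldB cs []
      _ = pvIState cs := by simp
  simp only [hcnt, hfd, hB]
  rw [pvFoldA cs (v / 2) []]
  have hmf : List.filterMap (fun x => x) (pvMask (v / 2) cs) = pvSkip (v / 2) cs := by
    simpa [Function.id_def] using pvMask_filterMap (v / 2) cs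
  simp [pvIState, ← hv, hmf]
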